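-- pv_equiv track=rewrite | github.com/posl/comment_recommendation | script/mod_gen/5_time/en/220_D/5.py | solve
-- ===== SOURCE A (Python) =====
-- def solve(N, A):
--     mod = 998244353
--     ans = [0] * 10
--     ans[A[0]] = 1
--     for i in range(1, N):
--         new_ans = [0] * 10
--         for j in range(10):
--             new_ans[(j + A[i]) % 10] += ans[j]
--             new_ans[(j * A[i]) % 10] += ans[j]
--         for j in range(10):
--             new_ans[j] %= mod
--         ans = new_ans
--     return ans
-- ===== SOURCE B (Python) =====
-- MOD = 998244353
--
--
-- def _mat(a):
--     # 10x10 transition matrix of one step: entry [k][j] counts the operations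
--     # among {add a, multiply a} that send last digit j to last digit k.
--     return [[int((j + a) % 10 == k) + int((j * a) % 10 == k) for j in range(10)]
--             for k in range(10)]
--
--
-- def _matmul(X, Y):
--     return [[sum(X[i][l] * Y[l][j] for l in range(10)) % MOD for j in range(10)]
--             for i in range(10)]
--
--
-- _I = [[int(i == j) for j in range(10)] for i in range(10)]
--
--
-- def _prod(ms):
--     # divide-and-conquer product; ms[0] is applied first, so the left factor
--     # of the recombination is the product of the later half
--     if not ms:
--         return _I
--     if len(ms) == 1:
--         return ms[0]
--     mid = len(ms) // 2
--     return _matmul(_prod(ms[mid:]), _prod(ms[:mid]))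
--
--
-- def solve(N, A):
--     start = A[0]
--     mats = [_mat(A[i]) for i in range(1, N)]
--     P = _prod(mats)
--     return [P[k][start] for k in range(10)]
-- ===== Notes on version B (the rewrite author's own statement) =====
-- stated objective: alternative
-- what changed: A runs a sequential 10-state DP updating a vector once per element; B builds a 10x10 transition matrix per element and combines them by a divide-and-conquer associative matrix product mod 998244353, then reads off the start column - no state vector is ever iterated.
import Mathlib
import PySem

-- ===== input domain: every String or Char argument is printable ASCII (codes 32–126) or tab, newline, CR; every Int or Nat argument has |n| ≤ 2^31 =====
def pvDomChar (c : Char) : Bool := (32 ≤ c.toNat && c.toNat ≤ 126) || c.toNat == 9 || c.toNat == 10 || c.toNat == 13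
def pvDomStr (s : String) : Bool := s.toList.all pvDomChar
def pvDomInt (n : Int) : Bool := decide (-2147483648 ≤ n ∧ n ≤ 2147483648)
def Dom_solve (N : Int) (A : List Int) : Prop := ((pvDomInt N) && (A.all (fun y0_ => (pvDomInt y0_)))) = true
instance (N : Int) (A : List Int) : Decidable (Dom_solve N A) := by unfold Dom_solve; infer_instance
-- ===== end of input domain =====

-- B replaces A's sequential state-vector DP by a divide-and-conquer product of
-- per-element 10x10 transition matrices (objective: alternative, similar cost).

-- ===== PORT A =====
-- one loop iteration of A: scatter each ans[j] into the two targets, then reduce mod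
def stepA (a : Int) (s : List Int) : List Int :=
  (PySem.List.pyRange 0 10 1).foldl
    (fun acc j =>
      PySem.List.pySetD acc j (PySem.Int.mod (PySem.List.pyGetD acc j 0) 998244353))
    ((PySem.List.pyRange 0 10 1).foldl
      (fun acc j =>
        let acc := PySem.List.pySetD acc (PySem.Int.mod (j + a) 10)
          (PySem.List.pyGetD acc (PySem.Int.mod (j + a) 10) 0 + PySem.List.pyGetD s j 0)
        PySem.List.pySetD acc (PySem.Int.mod (j * a) 10)
          (PySem.List.pyGetD acc (PySem.Int.mod (j * a) 10) 0 + PySem.List.pyGetD s j 0))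
      (List.replicate 10 0))

def solve (N : Int) (A : List Int) : List Int :=
  let ans := PySem.List.pySetD (List.replicate 10 0) (PySem.List.pyGetD A 0 0) 1
  (PySem.List.pyRange 1 N 1).foldl
    (fun ans i => stepA (PySem.List.pyGetD A i 0) ans) ans

-- ===== PORT B =====
-- _mat(a): entry [k][j] counts operations among {add a, multiply a} sending digit j to k
def matB (a : Int) : List (List Int) :=
  (PySem.List.pyRange 0 10 1).map (fun k =>
    (PySem.List.pyRange 0 10 1).map (fun j =>
      (if PySem.Int.mod (j + a) 10 = k then (1 : Int) else 0) +
      (if PySem.Int.mod (j * a) 10 = k then (1 : Int) else 0)))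

-- _matmul(X, Y) mod 998244353
def matmulB (X Y : List (List Int)) : List (List Int) :=
  (PySem.List.pyRange 0 10 1).map (fun i =>
    (PySem.List.pyRange 0 10 1).map (fun j =>
      PySem.Int.mod
        ((PySem.List.pyRange 0 10 1).foldl
          (fun acc l => acc +
            PySem.List.pyGetD (PySem.List.pyGetD X i []) l 0 *
            PySem.List.pyGetD (PySem.List.pyGetD Y l []) j 0) 0)
        998244353))

-- _I, the identity matrix
def matI : List (List Int) :=
  (PySem.List.pyRange 0 10 1).map (fun i =>
    (PySem.List.pyRange 0 10 1).map (fun j => if i = j then (1 : Int) else 0))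

-- _prod(ms): divide-and-conquer product; ms[0] is applied first
def prodB (ms : List (List (List Int))) : List (List Int) :=
  if ms = [] then matI
  else if ms.length = 1 then ms.headD []
  else
    let mid := ms.length / 2
    matmulB (prodB (ms.drop mid)) (prodB (ms.take mid))
termination_by ms.length
decreasing_by
  all_goals
    have h0 : 0 < ms.length := List.length_pos_iff.mpr ‹ms ≠ []›
    simp only [List.length_drop, List.length_take]
    omega

def solve_alt (N : Int) (A : List Int) : List Int :=
  let start := PySem.List.pyGetD A 0 0
  let mats := (PySem.List.pyRange 1 N 1).map (fun i => matB (PySem.List.pyGetD A i 0))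
  let P := prodB mats
  (PySem.List.pyRange 0 10 1).map (fun k =>
    PySem.List.pyGetD (PySem.List.pyGetD P k []) start 0)

-- ===== PRECONDITION & SPEC =====
-- exactly where Python A returns: A nonempty (A[0]), -10 ≤ A[0] ≤ 9 (index into the
-- 10-element list; negative indices wrap as in Python), and N ≤ len(A) (A[i] for i < N)
def Pre_solve (N : Int) (A : List Int) : Prop :=
  A ≠ [] ∧ -10 ≤ A.headD 0 ∧ A.headD 0 ≤ 9 ∧ N ≤ (A.length : Int)
instance (N : Int) (A : List Int) : Decidable (Pre_solve N A) := by unfold Pre_solve; infer_instance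

def pvWitness_solve : Int × List Int := (3, [2, 5, 7])

def Spec_solve (N : Int) (A : List Int) (out : List Int) : Prop := out = solve_alt N A
instance (N : Int) (A : List Int) (out : List Int) : Decidable (Spec_solve N A out) := by unfold Spec_solve; infer_instance

-- ===== CLAIM (what is proved, stated in full; the proofs are below) =====
def Claim_equal_solve : Prop := ∀ (N : Int) (A : List Int), Dom_solve N A → Pre_solve N A → Spec_solve N A (solve N A)

-- ===== LEMMAS AND PROOFS =====

-- semantic shadows of the two programs over ZMod 998244353
def cM (P : List (List Int)) : Matrix (Fin 10) (Fin 10) (ZMod 998244353) :=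
  Matrix.of fun i j =>
    ((PySem.List.pyGetD (PySem.List.pyGetD P ((i : Nat) : Int) []) ((j : Nat) : Int) 0 : Int) : ZMod 998244353)

def cV (v : List Int) : Fin 10 → ZMod 998244353 :=
  fun i => ((PySem.List.pyGetD v ((i : Nat) : Int) 0 : Int) : ZMod 998244353)

def zprod (ms : List (List (List Int))) : Matrix (Fin 10) (Fin 10) (ZMod 998244353) :=
  ms.foldl (fun acc P => cM P * acc) 1

-- a well-shaped bounded matrix / vector: entries in [0, 998244353)
def good (P : List (List Int)) : Prop :=
  P.length = 10 ∧ ∀ i : Nat, i < 10 →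
    (P.getD i []).length = 10 ∧ ∀ j : Nat, j < 10 →
      0 ≤ (P.getD i []).getD j 0 ∧ (P.getD i []).getD j 0 < 998244353

def goodVec (v : List Int) : Prop :=
  v.length = 10 ∧ ∀ i : Nat, i < 10 → 0 ≤ v.getD i 0 ∧ v.getD i 0 < 998244353

-- a clean per-step gather form A's scatter loop is first rewritten into
def matVecMod (P : List (List Int)) (s : List Int) : List Int :=
  (PySem.List.pyRange 0 10 1).map (fun k =>
    PySem.Int.mod
      ((PySem.List.pyRange 0 10 1).foldl
        (fun acc j => acc +
          PySem.List.pyGetD (PySem.List.pyGetD P k []) j 0 * PySem.List.pyGetD s j 0) 0)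
      998244353)

theorem len_map10 {α : Type} (f : Int → α) : ((PySem.List.pyRange 0 10 1).map f).length = 10 := by
  simp [PySem.List.length_pyRange_one]

theorem getD_map10 {α : Type} (f : Int → α) (d : α) (i : Nat) (hi : i < 10) :
    ((PySem.List.pyRange 0 10 1).map f).getD i d = f (i : Int) := by
  rw [List.getD_eq_getElem _ _ (by rw [len_map10]; omega), List.getElem_map,
      PySem.List.getElem_pyRange_one]
  simp

theorem foldl_sum (g : Int → Int) : (PySem.List.pyRange 0 10 1).foldl (fun acc l => acc + g l) 0
    = ∑ l ∈ Finset.range 10, g (l:Int) := by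
  have hR : PySem.List.pyRange 0 10 1 = [0,1,2,3,4,5,6,7,8,9] := by decide
  simp [hR, Finset.sum_range_succ]

theorem stepA_mod (a : Int) (s : List Int) : stepA a s = stepA (a % 10) s := by
  unfold stepA
  refine congrArg (fun ini => (PySem.List.pyRange 0 10 1).foldl
    (fun acc j =>
      PySem.List.pySetD acc j (PySem.Int.mod (PySem.List.pyGetD acc j 0) 998244353)) ini) ?_
  refine List.foldl_ext _ _ _ ?_
  intro acc j _
  have h1 : PySem.Int.mod (j + a) 10 = PySem.Int.mod (j + a % 10) 10 := by
    rw [PySem.Int.mod_eq_emod_of_pos (by norm_num), PySem.Int.mod_eq_emod_of_pos (by norm_num)]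
    omega
  have h2 : PySem.Int.mod (j * a) 10 = PySem.Int.mod (j * (a % 10)) 10 := by
    rw [PySem.Int.mod_eq_emod_of_pos (by norm_num), PySem.Int.mod_eq_emod_of_pos (by norm_num),
        Int.mul_emod j a 10, Int.mul_emod j (a % 10) 10, Int.emod_emod_of_dvd a (dvd_refl 10)]
  simp only [h1, h2]

theorem matB_mod (a : Int) : matB a = matB (a % 10) := by
  unfold matB
  refine congrArg (fun f => List.map f (PySem.List.pyRange 0 10 1)) (funext fun k => ?_)
  refine congrArg (fun f => List.map f (PySem.List.pyRange 0 10 1)) (funext fun j => ?_)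
  have h1 : PySem.Int.mod (j + a) 10 = PySem.Int.mod (j + a % 10) 10 := by
    rw [PySem.Int.mod_eq_emod_of_pos (by norm_num), PySem.Int.mod_eq_emod_of_pos (by norm_num)]
    omega
  have h2 : PySem.Int.mod (j * a) 10 = PySem.Int.mod (j * (a % 10)) 10 := by
    rw [PySem.Int.mod_eq_emod_of_pos (by norm_num), PySem.Int.mod_eq_emod_of_pos (by norm_num),
        Int.mul_emod j a 10, Int.mul_emod j (a % 10) 10, Int.emod_emod_of_dvd a (dvd_refl 10)]
  rw [h1, h2]

set_option maxHeartbeats 2000000 in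
theorem stepA_eq (a : Int) (s : List Int) : stepA a s = matVecMod (matB a) s := by
  rw [stepA_mod, matB_mod]
  have h0 : 0 ≤ a % 10 := Int.emod_nonneg a (by norm_num)
  have h10 : a % 10 < 10 := Int.emod_lt_of_pos a (by norm_num)
  have hR : PySem.List.pyRange 0 10 1 = [0,1,2,3,4,5,6,7,8,9] := by decide
  generalize hg : a % 10 = r at h0 h10 ⊢
  interval_cases r <;>
    simp [stepA, matVecMod, matB, hR, PySem.List.pySetD_of_nonneg,
          PySem.List.pyGetD_of_nonneg, List.replicate] <;> omega

theorem cast_matmulB (X Y : List (List Int)) : cM (matmulB X Y) = cM X * cM Y := by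
  ext i j
  have hi : (0:Int) ≤ ((i:Nat):Int) := by positivity
  have hi2 : ((i:Nat):Int) < 10 := by exact_mod_cast i.isLt
  have hj : (0:Int) ≤ ((j:Nat):Int) := by positivity
  have hj2 : ((j:Nat):Int) < 10 := by exact_mod_cast j.isLt
  rw [cM]
  show ((PySem.List.pyGetD (PySem.List.pyGetD (matmulB X Y) _ []) _ 0 : Int) : ZMod 998244353) = _
  rw [matmulB, PySem.List.pyGetD_map_pyRange_of_nonneg _ _ _ _ hi hi2,
      PySem.List.pyGetD_map_pyRange_of_nonneg _ _ _ _ hj hj2,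
      PySem.Int.mod_eq_emod_of_pos (by norm_num), foldl_sum,
      show ((998244353:Int)) = ((998244353:Nat):Int) from rfl, ZMod.intCast_mod]
  push_cast
  rw [Matrix.mul_apply, ← Fin.sum_univ_eq_sum_range
    (fun l => ((PySem.List.pyGetD (PySem.List.pyGetD X ((i:Nat):Int) []) ((l:Nat):Int) 0 : Int) : ZMod 998244353) *
              ((PySem.List.pyGetD (PySem.List.pyGetD Y ((l:Nat):Int) []) ((j:Nat):Int) 0 : Int) : ZMod 998244353)) 10]
  rfl

theorem cast_matVecMod (P : List (List Int)) (s : List Int) :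
    cV (matVecMod P s) = (cM P).mulVec (cV s) := by
  funext i
  have hi : (0:Int) ≤ ((i:Nat):Int) := by positivity
  have hi2 : ((i:Nat):Int) < 10 := by exact_mod_cast i.isLt
  show ((PySem.List.pyGetD (matVecMod P s) _ 0 : Int) : ZMod 998244353) = _
  rw [matVecMod, PySem.List.pyGetD_map_pyRange_of_nonneg _ _ _ _ hi hi2,
      PySem.Int.mod_eq_emod_of_pos (by norm_num), foldl_sum,
      show ((998244353:Int)) = ((998244353:Nat):Int) from rfl, ZMod.intCast_mod]
  push_cast
  rw [Matrix.mulVec, ← Fin.sum_univ_eq_sum_range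
    (fun l => ((PySem.List.pyGetD (PySem.List.pyGetD P ((i:Nat):Int) []) ((l:Nat):Int) 0 : Int) : ZMod 998244353) *
              ((PySem.List.pyGetD s ((l:Nat):Int) 0 : Int) : ZMod 998244353)) 10]
  rfl

theorem cast_matI : cM matI = 1 := by
  ext i j
  fin_cases i <;> fin_cases j <;> simp [cM, matI]

theorem zprod_foldl (l : List (List (List Int))) (a : Matrix (Fin 10) (Fin 10) (ZMod 998244353)) :
    l.foldl (fun acc P => cM P * acc) a = zprod l * a := by
  induction l generalizing a with
  | nil => simp [zprod]
  | cons P l ih =>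
    simp only [List.foldl_cons, zprod] at *
    rw [ih (cM P * a), ih (cM P * 1), mul_one, mul_assoc]

theorem zprod_append (xs ys : List (List (List Int))) :
    zprod (xs ++ ys) = zprod ys * zprod xs := by
  rw [zprod, List.foldl_append, zprod_foldl]
  rfl

theorem cast_prodB (ms : List (List (List Int))) : cM (prodB ms) = zprod ms := by
  induction ms using prodB.induct with
  | case1 => rw [prodB]; simp [cast_matI, zprod]
  | case2 ms h1 h2 =>
    rw [prodB]
    simp only [h1, h2, if_false, if_pos]
    match ms, h2 with
    | [P], _ => simp [zprod]
  | case3 ms h1 h2 mid ih1 ih2 =>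
    rw [prodB]
    simp only [h1, h2, reduceIte]
    rw [cast_matmulB, ih1, ih2, ← zprod_append, List.take_append_drop]

theorem good_matB (a : Int) : good (matB a) := by
  refine ⟨len_map10 _, fun i hi => ?_⟩
  rw [matB, getD_map10 _ _ i hi]
  refine ⟨len_map10 _, fun j hj => ?_⟩
  rw [getD_map10 _ _ j hj]
  constructor <;> (split_ifs <;> norm_num)

theorem good_matmulB (X Y : List (List Int)) : good (matmulB X Y) := by
  refine ⟨len_map10 _, fun i hi => ?_⟩
  rw [matmulB, getD_map10 _ _ i hi]
  refine ⟨len_map10 _, fun j hj => ?_⟩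
  rw [getD_map10 _ _ j hj]
  exact ⟨PySem.Int.mod_nonneg _ (by norm_num), PySem.Int.mod_lt _ (by norm_num)⟩

theorem good_matI : good matI := by
  refine ⟨len_map10 _, fun i hi => ?_⟩
  rw [matI, getD_map10 _ _ i hi]
  refine ⟨len_map10 _, fun j hj => ?_⟩
  rw [getD_map10 _ _ j hj]
  constructor <;> (split_ifs <;> norm_num)

theorem good_prodB (ms : List (List (List Int))) (hall : ∀ P ∈ ms, good P) :
    good (prodB ms) := by
  induction ms using prodB.induct with
  | case1 => rw [prodB]; simpa using good_matI
  | case2 ms h1 h2 =>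
    rw [prodB]
    simp only [h1, h2, if_false, if_pos]
    match ms, h2, hall with
    | [P], _, hall => exact hall P (by simp)
  | case3 ms h1 h2 mid ih1 ih2 =>
    rw [prodB]
    simp only [h1, h2, reduceIte]
    exact good_matmulB _ _

theorem goodVec_matVecMod (P : List (List Int)) (s : List Int) : goodVec (matVecMod P s) := by
  refine ⟨len_map10 _, fun i hi => ?_⟩
  rw [matVecMod, getD_map10 _ _ i hi]
  exact ⟨PySem.Int.mod_nonneg _ (by norm_num), PySem.Int.mod_lt _ (by norm_num)⟩

theorem goodVec_fold (ds : List Int) (v : List Int) (hv : goodVec v) :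
    goodVec (ds.foldl (fun s a => matVecMod (matB a) s) v) := by
  induction ds generalizing v with
  | nil => exact hv
  | cons a ds ih => exact ih _ (goodVec_matVecMod _ _)

set_option maxHeartbeats 1000000 in
theorem foldl_cast (ds : List Int) (v : List Int) :
    cV (ds.foldl (fun s a => matVecMod (matB a) s) v)
      = (zprod (ds.map matB)).mulVec (cV v) := by
  induction ds generalizing v with
  | nil => simp [zprod, Matrix.one_mulVec]
  | cons a ds ih =>
    simp only [List.foldl_cons, List.map_cons]
    rw [ih, cast_matVecMod, Matrix.mulVec_mulVec]
    congr 1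
    have hz : zprod (matB a :: ds.map matB) = zprod (ds.map matB) * cM (matB a) := by
      rw [zprod, List.foldl_cons, zprod_foldl, mul_one]
    exact hz.symm

theorem castInj (a b : Int) (ha : 0 ≤ a) (ha2 : a < 998244353) (hb : 0 ≤ b) (hb2 : b < 998244353)
    (h : (a : ZMod 998244353) = (b : ZMod 998244353)) : a = b := by
  have := (ZMod.intCast_eq_intCast_iff' a b 998244353).mp h
  simp at this
  omega

theorem listEq (v w : List Int) (hv : goodVec v) (hw : goodVec w) (h : cV v = cV w) : v = w := by
  apply List.ext_getElem (hv.1.trans hw.1.symm)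
  intro k hk1 hk2
  have hk : k < 10 := hv.1 ▸ hk1
  have hcv := congrFun h ⟨k, hk⟩
  simp only [cV, PySem.List.pyGetD_natCast] at hcv
  have := castInj _ _ (hv.2 k hk).1 (hv.2 k hk).2 (hw.2 k hk).1 (hw.2 k hk).2 hcv
  rwa [List.getD_eq_getElem _ _ hk1, List.getD_eq_getElem _ _ hk2] at this

theorem mod_toNat_lt (start : Int) : (PySem.Int.mod start 10).toNat < 10 := by
  have h2 := PySem.Int.mod_lt start (by norm_num : (0:Int) < 10)
  omega

theorem rowGet (xs : List Int) (h : xs.length = 10) (start : Int)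
    (h1 : -10 ≤ start) (h2 : start < 10) :
    PySem.List.pyGetD xs start 0 = xs.getD (PySem.Int.mod start 10).toNat 0 := by
  by_cases hp : 0 ≤ start
  · have hm : (PySem.Int.mod start 10).toNat = start.toNat := by
      rw [PySem.Int.mod_eq_emod_of_pos (by norm_num)]; omega
    rw [hm, PySem.List.pyGetD_eq_getElem _ _ hp (by omega),
        List.getD_eq_getElem _ _ (by omega)]
  · have hp' : start < 0 := by omega
    interval_cases start <;>
      first
      | (rw [show ((PySem.Int.mod (-10) 10).toNat) = 0 from by decide,
             PySem.List.pyGetD_neg_ofNat xs 10 0 (by norm_num) (by omega),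
             List.getD_eq_getElem _ _ (by omega)]; congr 1; omega)
      | (rw [show ((PySem.Int.mod (-9) 10).toNat) = 1 from by decide,
             PySem.List.pyGetD_neg_ofNat xs 9 0 (by norm_num) (by omega),
             List.getD_eq_getElem _ _ (by omega)]; congr 1; omega)
      | (rw [show ((PySem.Int.mod (-8) 10).toNat) = 2 from by decide,
             PySem.List.pyGetD_neg_ofNat xs 8 0 (by norm_num) (by omega),
             List.getD_eq_getElem _ _ (by omega)]; congr 1; omega)
      | (rw [show ((PySem.Int.mod (-7) 10).toNat) = 3 from by decide,
             PySem.List.pyGetD_neg_ofNat xs 7 0 (by norm_num) (by omega),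
             List.getD_eq_getElem _ _ (by omega)]; congr 1; omega)
      | (rw [show ((PySem.Int.mod (-6) 10).toNat) = 4 from by decide,
             PySem.List.pyGetD_neg_ofNat xs 6 0 (by norm_num) (by omega),
             List.getD_eq_getElem _ _ (by omega)]; congr 1; omega)
      | (rw [show ((PySem.Int.mod (-5) 10).toNat) = 5 from by decide,
             PySem.List.pyGetD_neg_ofNat xs 5 0 (by norm_num) (by omega),
             List.getD_eq_getElem _ _ (by omega)]; congr 1; omega)
      | (rw [show ((PySem.Int.mod (-4) 10).toNat) = 6 from by decide,
             PySem.List.pyGetD_neg_ofNat xs 4 0 (by norm_num) (by omega),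
             List.getD_eq_getElem _ _ (by omega)]; congr 1; omega)
      | (rw [show ((PySem.Int.mod (-3) 10).toNat) = 7 from by decide,
             PySem.List.pyGetD_neg_ofNat xs 3 0 (by norm_num) (by omega),
             List.getD_eq_getElem _ _ (by omega)]; congr 1; omega)
      | (rw [show ((PySem.Int.mod (-2) 10).toNat) = 8 from by decide,
             PySem.List.pyGetD_neg_ofNat xs 2 0 (by norm_num) (by omega),
             List.getD_eq_getElem _ _ (by omega)]; congr 1; omega)
      | (rw [show ((PySem.Int.mod (-1) 10).toNat) = 9 from by decide,
             PySem.List.pyGetD_neg_ofNat xs 1 0 (by norm_num) (by omega),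
             List.getD_eq_getElem _ _ (by omega)]; congr 1; omega)

set_option maxHeartbeats 1000000 in
theorem cV_e (start : Int) (h1 : -10 ≤ start) (h2 : start < 10) :
    cV (PySem.List.pySetD (List.replicate 10 (0:Int)) start 1)
      = Pi.single (⟨(PySem.Int.mod start 10).toNat, mod_toNat_lt start⟩ : Fin 10) 1 := by
  interval_cases start <;>
    (funext i; fin_cases i <;> simp [cV, Pi.single_apply] <;> decide)

set_option maxHeartbeats 1000000 in
theorem goodVec_e (start : Int) (h1 : -10 ≤ start) (h2 : start < 10) :
    goodVec (PySem.List.pySetD (List.replicate 10 (0:Int)) start 1) := by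
  interval_cases start <;> exact ⟨by decide, by decide⟩

theorem solve_eq (N : Int) (A : List Int) (hpre : Pre_solve N A) : solve N A = solve_alt N A := by
  obtain ⟨hne, hlo, hhi, hlen⟩ := hpre
  simp only [solve, solve_alt]
  set start := PySem.List.pyGetD A 0 0 with hstartdef
  have hstart : start = A.headD 0 := by
    rw [hstartdef, PySem.List.pyGetD_zero]
    match A, hne with
    | a :: t, _ => rfl
  have h1 : -10 ≤ start := hstart ▸ hlo
  have h2 : start < 10 := by rw [hstart]; omega
  set e := PySem.List.pySetD (List.replicate 10 (0:Int)) start 1 with hedef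
  set ds := (PySem.List.pyRange 1 N 1).map (fun i => PySem.List.pyGetD A i 0) with hdsdef
  set mats := (PySem.List.pyRange 1 N 1).map (fun i => matB (PySem.List.pyGetD A i 0)) with hmatsdef
  have hmats : mats = ds.map matB := by
    rw [hmatsdef, hdsdef, List.map_map]; rfl
  set P := prodB mats with hPdef
  have hgoodP : good P := by
    refine good_prodB mats (fun Q hQ => ?_)
    rw [hmats] at hQ
    obtain ⟨a, _, rfl⟩ := List.mem_map.mp hQ
    exact good_matB a
  have hA : (PySem.List.pyRange 1 N 1).foldl
      (fun ans i => stepA (PySem.List.pyGetD A i 0) ans) e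
      = ds.foldl (fun s a => matVecMod (matB a) s) e := by
    rw [hdsdef, List.foldl_map]
    refine List.foldl_ext _ _ _ ?_
    intro s i _
    exact stepA_eq _ s
  rw [hA]
  set dFin : Fin 10 := ⟨(PySem.Int.mod start 10).toNat, mod_toNat_lt start⟩ with hdFin
  refine listEq _ _ (goodVec_fold ds e (goodVec_e start h1 h2)) ?_ ?_
  · -- goodVec of B's output list
    refine ⟨len_map10 _, fun i hi => ?_⟩
    rw [getD_map10 _ _ i hi]
    simp only [PySem.List.pyGetD_natCast]
    rw [rowGet _ ((hgoodP.2 i hi).1) start h1 h2]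
    exact (hgoodP.2 i hi).2 _ (mod_toNat_lt start)
  · -- cast equality of the two outputs
    rw [foldl_cast, ← hmats, cV_e start h1 h2, (cast_prodB mats).symm, ← hPdef]
    funext i
    have hi : (i : Nat) < 10 := i.isLt
    have hrow : (P.getD (i:Nat) []).length = 10 := (hgoodP.2 (i:Nat) hi).1
    have hmv : (cM P).mulVec (Pi.single dFin 1) i = cM P i dFin := by simp [Matrix.mulVec]
    rw [hmv]
    simp only [cV, cM, Matrix.of_apply, PySem.List.pyGetD_natCast]
    rw [getD_map10 _ _ _ hi]
    simp only [PySem.List.pyGetD_natCast]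
    rw [rowGet _ hrow start h1 h2]

-- ===== VERDICT (by name: the statement is the Claim_ definition above) =====
theorem solve_spec : Claim_equal_solve := by
  intro N A _ hpre
  unfold Spec_solve
  exact solve_eq N A hpre
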